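-- pv_equiv track=rewrite | github.com/mccredie/aoc | 2020/dec22/ex2.py | parse_players
-- ===== SOURCE A (Python) =====
-- def parse_players(lines):
--     players = []
--     player = []
--     for line in lines:
--         line = line.strip()
--         if line.startswith('Player'):
--             continue
--         elif line:
--             player.append(int(line))
--         else:
--             players.append(player)
--             player = []
--     players.append(player)
--     return players
-- ===== SOURCE B (Python) =====
-- def parse_players(lines):
--     # Recursive split: peel off the first blank-terminated segment, parse it, recurse on the rest.
--     i = 0
--     while i < len(lines) and lines[i].strip():
--         i += 1
--     deck = [int(s) for s in (l.strip() for l in lines[:i]) if not s.startswith('Player')]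
--     if i == len(lines):
--         return [deck]
--     return [deck] + parse_players(lines[i + 1:])
-- ===== Notes on version B (the rewrite author's own statement) =====
-- stated objective: alternative
-- what changed: Replaces A's single interleaved state-machine loop (accumulating a partial deck and a list of decks) with a recursive split: peel off the first blank-terminated segment, parse it with a comprehension, and recurse on the remaining lines.
import Mathlib
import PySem

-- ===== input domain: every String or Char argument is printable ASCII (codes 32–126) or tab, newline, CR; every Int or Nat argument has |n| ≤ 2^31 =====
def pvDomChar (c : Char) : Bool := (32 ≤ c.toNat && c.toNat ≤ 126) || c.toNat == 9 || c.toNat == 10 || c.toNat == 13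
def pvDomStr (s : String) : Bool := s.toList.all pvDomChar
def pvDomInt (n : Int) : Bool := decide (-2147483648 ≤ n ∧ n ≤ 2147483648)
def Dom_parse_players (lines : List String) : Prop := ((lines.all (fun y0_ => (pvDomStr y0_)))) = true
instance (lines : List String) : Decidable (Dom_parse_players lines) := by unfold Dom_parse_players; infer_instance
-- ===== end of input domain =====

-- B parses the same decks by recursive segment-splitting instead of A's interleaved accumulator loop; same O(n) cost.

-- ===== PORT A =====
-- Literal port of A's loop: state = (finished decks, current deck); int(line) is
-- PySem.Int.ofStr? (some under Pre_; the .getD 0 is never reached inside Pre_).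
def parse_players (lines : List String) : List (List Int) :=
  let st := lines.foldl
    (fun (acc : List (List Int) × List Int) line =>
      if PySem.Str.startswith (PySem.Str.strip line) "Player" then acc
      else if PySem.Str.strip line = "" then (acc.1 ++ [acc.2], [])
      else (acc.1, acc.2 ++ [(PySem.Int.ofStr? (PySem.Str.strip line)).getD 0]))
    ([], [])
  st.1 ++ [st.2]

-- ===== PORT B =====
-- the deck comprehension: strip already applied; skip 'Player' headers, int() the rest
def pvParseDeck (seg : List String) : List Int :=
  (seg.filter (fun s => !(PySem.Str.startswith s "Player"))).map
    (fun s => (PySem.Int.ofStr? s).getD 0)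

-- recursive split on the first blank (whitespace-only) line
def parse_players_alt (lines : List String) : List (List Int) :=
  let seg := lines.takeWhile (fun l => PySem.Str.strip l != "")
  let deck := pvParseDeck (seg.map PySem.Str.strip)
  if seg.length = lines.length then [deck]
  else deck :: parse_players_alt (lines.drop (seg.length + 1))
termination_by lines.length
decreasing_by
  have hle : seg.length ≤ lines.length :=
    (List.takeWhile_prefix (p := fun l => PySem.Str.strip l != "")).length_le
  simp only [List.length_drop]
  omega

-- ===== PRECONDITION & SPEC =====
-- Pre_ excludes exactly the inputs on which Python A raises ValueError: a line whose
-- stripped form is non-empty, does not start with 'Player', and is not a valid int literal.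
def Pre_parse_players (lines : List String) : Prop :=
  ∀ l ∈ lines,
    PySem.Str.startswith (PySem.Str.strip l) "Player" = true ∨
    PySem.Str.strip l = "" ∨
    (PySem.Int.ofStr? (PySem.Str.strip l)).isSome = true
instance (lines : List String) : Decidable (Pre_parse_players lines) := by
  unfold Pre_parse_players; infer_instance

def pvWitness_parse_players : List String :=
  ["Player 1:", "9", " 2 ", "", "Player 2:", "5", "+7"]

def Spec_parse_players (lines : List String) (out : List (List Int)) : Prop := out = parse_players_alt lines
instance (lines : List String) (out : List (List Int)) : Decidable (Spec_parse_players lines out) := by unfold Spec_parse_players; infer_instance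

-- ===== CLAIM (what is proved, stated in full; the proofs are below) =====
def Claim_equal_parse_players : Prop := ∀ (lines : List String), Dom_parse_players lines → Pre_parse_players lines → Spec_parse_players lines (parse_players lines)

-- ===== LEMMAS AND PROOFS =====

-- A's loop, rephrased as structural recursion carrying only the current deck
def pvGo (cur : List Int) : List String → List (List Int)
  | [] => [cur]
  | l :: ls =>
    if PySem.Str.startswith (PySem.Str.strip l) "Player" then pvGo cur ls
    else if PySem.Str.strip l = "" then cur :: pvGo [] ls
    else pvGo (cur ++ [(PySem.Int.ofStr? (PySem.Str.strip l)).getD 0]) ls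

lemma parse_players_eq_go (lines : List String) :
    ∀ (ps : List (List Int)) (cur : List Int),
      (lines.foldl
        (fun (acc : List (List Int) × List Int) line =>
          if PySem.Str.startswith (PySem.Str.strip line) "Player" then acc
          else if PySem.Str.strip line = "" then (acc.1 ++ [acc.2], [])
          else (acc.1, acc.2 ++ [(PySem.Int.ofStr? (PySem.Str.strip line)).getD 0]))
        (ps, cur)).1 ++
      [(lines.foldl
        (fun (acc : List (List Int) × List Int) line =>
          if PySem.Str.startswith (PySem.Str.strip line) "Player" then acc
          else if PySem.Str.strip line = "" then (acc.1 ++ [acc.2], [])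
          else (acc.1, acc.2 ++ [(PySem.Int.ofStr? (PySem.Str.strip line)).getD 0]))
        (ps, cur)).2] = ps ++ pvGo cur lines := by
  induction lines with
  | nil => intro ps cur; simp only [List.foldl_nil, pvGo]
  | cons l ls ih =>
    intro ps cur
    rw [List.foldl_cons, pvGo]
    by_cases hp : PySem.Str.startswith (PySem.Str.strip l) "Player" = true
    · rw [if_pos hp, if_pos hp]
      exact ih ps cur
    · rw [if_neg hp, if_neg hp]
      by_cases hb : PySem.Str.strip l = ""
      · rw [if_pos hb, if_pos hb]
        have h := ih (ps ++ [cur]) []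
        simp only [List.append_assoc, List.singleton_append] at h
        exact h
      · rw [if_neg hb, if_neg hb]
        exact ih ps (cur ++ [(PySem.Int.ofStr? (PySem.Str.strip l)).getD 0])

lemma pvParseDeck_cons_skip (s : String) (seg : List String)
    (h : PySem.Str.startswith s "Player" = true) :
    pvParseDeck (s :: seg) = pvParseDeck seg := by
  simp only [pvParseDeck, List.filter_cons, h, Bool.not_true, Bool.false_eq_true, if_false]

lemma pvParseDeck_cons_val (s : String) (seg : List String)
    (h : ¬ PySem.Str.startswith s "Player" = true) :
    pvParseDeck (s :: seg) = (PySem.Int.ofStr? s).getD 0 :: pvParseDeck seg := by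
  simp only [pvParseDeck, List.filter_cons, Bool.not_eq_eq_eq_not, Bool.not_true]
  rw [if_pos]
  · rfl
  · simp [Bool.not_eq_true] at h ⊢
    exact h

lemma alt_unfold (lines : List String) :
    parse_players_alt lines =
      (if (lines.takeWhile (fun l => PySem.Str.strip l != "")).length = lines.length then
        [pvParseDeck ((lines.takeWhile (fun l => PySem.Str.strip l != "")).map PySem.Str.strip)]
      else
        pvParseDeck ((lines.takeWhile (fun l => PySem.Str.strip l != "")).map PySem.Str.strip) ::
          parse_players_alt
            (lines.drop ((lines.takeWhile (fun l => PySem.Str.strip l != "")).length + 1))) := by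
  rw [parse_players_alt.eq_def]

lemma alt_cons_blank (l : String) (ls : List String) (h : PySem.Str.strip l = "") :
    parse_players_alt (l :: ls) = [] :: parse_players_alt ls := by
  conv_lhs => rw [alt_unfold]
  rw [List.takeWhile_cons_of_neg (by simp [h])]
  simp [pvParseDeck]

lemma alt_cons_skip (l : String) (ls : List String) (h1 : PySem.Str.strip l ≠ "")
    (h2 : PySem.Str.startswith (PySem.Str.strip l) "Player" = true) :
    parse_players_alt (l :: ls) = parse_players_alt ls := by
  conv_lhs => rw [alt_unfold]
  rw [List.takeWhile_cons_of_pos (by simp [h1])]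
  simp only [List.length_cons, List.map_cons, List.drop_succ_cons, Nat.add_right_cancel_iff]
  rw [pvParseDeck_cons_skip _ _ h2]
  conv_rhs => rw [alt_unfold]

lemma alt_cons_val (l : String) (ls : List String) (h1 : PySem.Str.strip l ≠ "")
    (h2 : ¬ PySem.Str.startswith (PySem.Str.strip l) "Player" = true) :
    parse_players_alt (l :: ls) =
      (parse_players_alt ls).modifyHead
        (fun d => (PySem.Int.ofStr? (PySem.Str.strip l)).getD 0 :: d) := by
  conv_lhs => rw [alt_unfold]
  rw [List.takeWhile_cons_of_pos (by simp [h1])]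
  simp only [List.length_cons, List.map_cons, List.drop_succ_cons, Nat.add_right_cancel_iff]
  rw [pvParseDeck_cons_val _ _ h2]
  conv_rhs => rw [alt_unfold]
  by_cases hlen : (ls.takeWhile (fun l => PySem.Str.strip l != "")).length = ls.length
  · rw [if_pos hlen, if_pos hlen]; rfl
  · rw [if_neg hlen, if_neg hlen]; rfl

lemma go_eq_alt (lines : List String) :
    ∀ cur, pvGo cur lines = (parse_players_alt lines).modifyHead (fun d => cur ++ d) := by
  induction lines with
  | nil =>
    intro cur
    rw [alt_unfold]
    simp [pvGo, pvParseDeck]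
  | cons l ls ih =>
    intro cur
    rw [pvGo]
    by_cases hb : PySem.Str.strip l = ""
    · have hp : ¬ PySem.Str.startswith (PySem.Str.strip l) "Player" = true := by
        rw [hb]; decide
      rw [if_neg hp, if_pos hb, ih, alt_cons_blank l ls hb]
      cases parse_players_alt ls with
      | nil => simp
      | cons d t => simp
    · by_cases hp : PySem.Str.startswith (PySem.Str.strip l) "Player" = true
      · rw [if_pos hp, ih, alt_cons_skip l ls hb hp]
      · rw [if_neg hp, if_neg hb, ih, alt_cons_val l ls hb hp]
        cases parse_players_alt ls with
        | nil => simp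
        | cons d t => simp

-- ===== VERDICT (by name: the statement is the Claim_ definition above) =====
theorem parse_players_spec : Claim_equal_parse_players := by
  intro lines _ _
  unfold Spec_parse_players parse_players
  have h := parse_players_eq_go lines [] []
  simp only [List.nil_append] at h
  rw [h, go_eq_alt lines []]
  cases parse_players_alt lines with
  | nil => simp
  | cons d t => simp
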